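-- pv_equiv track=rewrite | github.com/DonnyLe/CMU-15-112-Term-Project | hw3/blueprint.py | giveIndex
-- ===== SOURCE A (Python) =====
-- def giveIndex(row, col, numrow, numcol):
--     i = 0
--     for indexCol in range(numcol):
--         for indexRow in range(numrow):
--             if(indexRow == row and indexCol == col):
--                 return i
--             else:
--                 i +=1
-- ===== SOURCE B (Python) =====
-- def giveIndex(row, col, numrow, numcol):
--     if 0 <= row < numrow and 0 <= col < numcol:
--         return col * numrow + row
--     return None
-- ===== Notes on version B (the rewrite author's own statement) =====
-- stated objective: faster
-- what changed: Replaced the nested counting loops (O(numrow*numcol)) with the closed-form column-major formula col*numrow+row under a bounds check, returning None out of bounds.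
import Mathlib
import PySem

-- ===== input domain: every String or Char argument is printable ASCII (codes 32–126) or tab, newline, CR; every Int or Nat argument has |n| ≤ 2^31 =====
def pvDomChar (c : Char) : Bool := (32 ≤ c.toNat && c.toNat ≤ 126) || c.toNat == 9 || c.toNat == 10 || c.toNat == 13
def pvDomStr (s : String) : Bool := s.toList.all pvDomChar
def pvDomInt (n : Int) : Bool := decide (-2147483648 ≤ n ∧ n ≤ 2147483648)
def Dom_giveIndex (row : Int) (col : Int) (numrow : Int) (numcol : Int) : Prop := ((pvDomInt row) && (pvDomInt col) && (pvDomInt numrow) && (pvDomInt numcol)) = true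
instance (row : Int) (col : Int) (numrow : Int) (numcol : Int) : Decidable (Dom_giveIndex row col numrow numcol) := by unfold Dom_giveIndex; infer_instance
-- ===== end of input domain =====

-- B replaces A's nested counting loops by the closed-form column-major formula
-- col*numrow+row under a bounds check (None out of bounds); objective: faster.

-- ===== PORT A =====
-- inner loop: walks the row indices, incrementing the counter i;
-- .inl v = the Python 'return i' fired with value v, .inr i' = loop finished with counter i'
def giveIndexInner (row : Int) (col : Int) (indexCol : Int) : List Int → Int → Sum Int Int
  | [], i => .inr i
  | indexRow :: rest, i =>
      if indexRow = row ∧ indexCol = col then .inl i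
      else giveIndexInner row col indexCol rest (i + 1)

-- outer loop: walks the column indices, threading the counter through the inner loop
def giveIndexOuter (row : Int) (col : Int) (numrow : Int) : List Int → Int → Option Int
  | [], _ => none
  | indexCol :: rest, i =>
      match giveIndexInner row col indexCol (PySem.List.pyRange 0 numrow 1) i with
      | .inl v => some v
      | .inr i' => giveIndexOuter row col numrow rest i'

def giveIndex (row : Int) (col : Int) (numrow : Int) (numcol : Int) : Option Int :=
  giveIndexOuter row col numrow (PySem.List.pyRange 0 numcol 1) 0

-- ===== PORT B =====
def giveIndex_alt (row : Int) (col : Int) (numrow : Int) (numcol : Int) : Option Int :=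
  if 0 ≤ row ∧ row < numrow ∧ 0 ≤ col ∧ col < numcol then some (col * numrow + row)
  else none

-- ===== PRECONDITION & SPEC =====
def Spec_giveIndex (row : Int) (col : Int) (numrow : Int) (numcol : Int) (out : Option Int) : Prop := out = giveIndex_alt row col numrow numcol
instance (row : Int) (col : Int) (numrow : Int) (numcol : Int) (out : Option Int) : Decidable (Spec_giveIndex row col numrow numcol out) := by unfold Spec_giveIndex; infer_instance

-- ===== CLAIM (what is proved, stated in full; the proofs are below) =====
def Claim_equal_giveIndex : Prop := ∀ (row : Int) (col : Int) (numrow : Int) (numcol : Int), Dom_giveIndex row col numrow numcol → Spec_giveIndex row col numrow numcol (giveIndex row col numrow numcol)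

-- ===== LEMMAS AND PROOFS =====

theorem giveIndexInner_spec (row col c a : Int) (n : Nat) (i : Int) :
    giveIndexInner row col c (PySem.List.pyRange a (a + n) 1) i =
      if c = col ∧ a ≤ row ∧ row < a + n then .inl (i + (row - a)) else .inr (i + n) := by
  induction n generalizing a i with
  | zero =>
      rw [PySem.List.pyRange_one_eq_nil (by omega), if_neg (by rintro ⟨-, h2, h3⟩; omega)]
      simp [giveIndexInner]
  | succ n ih =>
      rw [PySem.List.pyRange_one_cons (by omega)]
      simp only [giveIndexInner]
      by_cases h : a = row ∧ c = col
      · rw [if_pos h, if_pos (show c = col ∧ a ≤ row ∧ row < a + ((n + 1 : Nat) : Int) from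
          ⟨h.2, by omega, by omega⟩)]
        congr 1; omega
      · rw [if_neg h]
        have : a + ((n + 1 : Nat) : Int) = (a + 1) + (n : Nat) := by push_cast; ring
        rw [this, ih]
        by_cases hc : c = col ∧ a + 1 ≤ row ∧ row < a + 1 + n
        · rw [if_pos hc, if_pos ⟨hc.1, by omega, by omega⟩]
          congr 1; omega
        · rw [if_neg hc, if_neg (by
            intro ⟨h1, h2, h3⟩
            exact hc ⟨h1, by omega, by omega⟩)]
          congr 1; omega

theorem giveIndexOuter_spec (row col numrow : Int) (n : Nat) (a i : Int) :
    giveIndexOuter row col numrow (PySem.List.pyRange a (a + n) 1) i =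
      if a ≤ col ∧ col < a + n ∧ 0 ≤ row ∧ row < numrow then
        some (i + (col - a) * numrow + row)
      else none := by
  induction n generalizing a i with
  | zero =>
      rw [PySem.List.pyRange_one_eq_nil (by omega), if_neg (by rintro ⟨h1, h2, -⟩; omega)]
      simp [giveIndexOuter]
  | succ n ih =>
      rw [PySem.List.pyRange_one_cons (by omega)]
      simp only [giveIndexOuter]
      have hrange : PySem.List.pyRange 0 numrow 1 = PySem.List.pyRange 0 (0 + (numrow.toNat : Int)) 1 := by
        by_cases h : 0 ≤ numrow
        · rw [Int.toNat_of_nonneg h]; ring_nf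
        · rw [PySem.List.pyRange_one_eq_nil (by omega),
              PySem.List.pyRange_one_eq_nil (by omega)]
      rw [hrange, giveIndexInner_spec]
      by_cases h : a = col ∧ 0 ≤ row ∧ row < 0 + (numrow.toNat : Int)
      · rw [if_pos h]
        have : a ≤ col ∧ col < a + ((n + 1 : Nat) : Int) ∧ 0 ≤ row ∧ row < numrow := by
          refine ⟨by omega, by omega, h.2.1, by omega⟩
        rw [if_pos this]
        have : col - a = 0 := by omega
        simp [this]
      · rw [if_neg h]
        have ha1 : a + ((n + 1 : Nat) : Int) = (a + 1) + (n : Nat) := by push_cast; ring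
        show giveIndexOuter row col numrow (PySem.List.pyRange (a + 1) (a + ((n + 1 : Nat) : Int)) 1) (i + (numrow.toNat : Int)) = _
        rw [ha1, ih]
        by_cases hc : a + 1 ≤ col ∧ col < a + 1 + n ∧ 0 ≤ row ∧ row < numrow
        · rw [if_pos hc, if_pos ⟨by omega, by omega, hc.2.2⟩]
          have hnr : (numrow.toNat : Int) = numrow := by omega
          congr 1
          rw [hnr]
          have : (col - a) * numrow = numrow + (col - (a + 1)) * numrow := by ring
          rw [this]; ring
        · rw [if_neg hc, if_neg (by
            intro ⟨h1, h2, h3, h4⟩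
            apply hc
            refine ⟨?_, by omega, h3, h4⟩
            rcases eq_or_lt_of_le h1 with he | hl
            · exact absurd ⟨he.symm ▸ rfl, h3, by omega⟩ h
            · omega)]

-- ===== VERDICT (by name: the statement is the Claim_ definition above) =====
theorem giveIndex_spec : Claim_equal_giveIndex := by
  intro row col numrow numcol _
  unfold Spec_giveIndex giveIndex giveIndex_alt
  have hrange : PySem.List.pyRange 0 numcol 1 = PySem.List.pyRange 0 (0 + (numcol.toNat : Int)) 1 := by
    by_cases h : 0 ≤ numcol
    · rw [Int.toNat_of_nonneg h]; ring_nf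
    · rw [PySem.List.pyRange_one_eq_nil (by omega),
          PySem.List.pyRange_one_eq_nil (by omega)]
  rw [hrange, giveIndexOuter_spec]
  by_cases h : 0 ≤ row ∧ row < numrow ∧ 0 ≤ col ∧ col < numcol
  · rw [if_pos (by refine ⟨h.2.2.1, by omega, h.1, h.2.1⟩), if_pos h]
    congr 1; ring
  · rw [if_neg (by intro ⟨h1, h2, h3, h4⟩; exact h ⟨h3, h4, h1, by omega⟩), if_neg h]
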